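-- pv_equiv track=rewrite | github.com/jlevy/strif | src/strif/string_replace.py | replace_multiple
-- ===== SOURCE A (Python) =====
-- from typing import TypeAlias
--
-- Replacement: TypeAlias = tuple[int, int, str]
--
-- def replace_multiple(text: str, replacements: list[Replacement]) -> str:
--     """
--     Replace multiple substrings in `text` with new strings, simultaneously.
--     The replacements are a list of tuples (start_offset, end_offset, new_string).
--     """
--     replacements = sorted(replacements, key=lambda x: x[0])
--     chunks: list[str] = []
--     last_end = 0
--     for start, end, new_text in replacements:
--         if start < last_end:
--             raise ValueError("Overlapping replacements are not allowed.")
--         chunks.append(text[last_end:start])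
--         chunks.append(new_text)
--         last_end = end
--     chunks.append(text[last_end:])
--     return "".join(chunks)
-- ===== SOURCE B (Python) =====
-- def replace_multiple(text, replacements):
--     """
--     Replace multiple substrings in `text` with new strings, simultaneously.
--     Builds the result back-to-front from the replacements sorted by start
--     offset: each piece is prepended, so no chunk list or join is needed.
--     """
--     out = ""
--     prev_start = None
--     for start, end, new_text in reversed(sorted(replacements, key=lambda x: x[0])):
--         if prev_start is None:
--             tail = text[end:]
--         elif end > prev_start:
--             raise ValueError("Overlapping replacements are not allowed.")
--         else:
--             tail = text[end:prev_start]
--         out = new_text + tail + out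
--         prev_start = start
--     if prev_start is None:
--         return text
--     return text[:prev_start] + out
-- ===== Notes on version B (the rewrite author's own statement) =====
-- stated objective: alternative
-- what changed: Instead of accumulating a chunk list left-to-right with a last_end cursor and joining it, B walks the sorted replacements in reverse and builds the output string back-to-front, pairing each end offset with the start of the replacement to its right and finally prepending the prefix before the first start; no chunk list, no join, no last_end.
import Mathlib
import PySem

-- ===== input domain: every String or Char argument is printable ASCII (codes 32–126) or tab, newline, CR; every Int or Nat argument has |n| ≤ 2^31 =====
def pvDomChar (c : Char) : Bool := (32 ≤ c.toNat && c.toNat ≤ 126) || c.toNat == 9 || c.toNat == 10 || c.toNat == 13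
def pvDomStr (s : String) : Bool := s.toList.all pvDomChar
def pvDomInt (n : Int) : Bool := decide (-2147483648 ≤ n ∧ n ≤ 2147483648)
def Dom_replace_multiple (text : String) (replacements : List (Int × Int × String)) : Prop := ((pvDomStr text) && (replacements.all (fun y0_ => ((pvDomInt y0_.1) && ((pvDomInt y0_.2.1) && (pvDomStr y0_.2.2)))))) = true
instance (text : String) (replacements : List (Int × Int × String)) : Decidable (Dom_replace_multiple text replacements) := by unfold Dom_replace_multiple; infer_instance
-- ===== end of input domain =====

-- B replaces A's forward chunk-list accumulation (last_end cursor + final join) by building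
-- the output string back-to-front over the reversed sorted list, pairing each end offset
-- with the following start (alternative decomposition, same cost class).

-- ===== PORT A =====
-- A's loop over the sorted replacements; none = the ValueError path
def replaceAGo (t : List Char) (l : List (Int × Int × String))
    (lastEnd : Int) (chunks : List (List Char)) : Option (List (List Char)) :=
  match l with
  | [] => some (chunks ++ [PySem.List.slice t (some lastEnd) none])
  | (s, e, nw) :: rest =>
      if s < lastEnd then none   -- raise ValueError("Overlapping replacements are not allowed.")
      else replaceAGo t rest e
             (chunks ++ [PySem.List.slice t (some lastEnd) (some s), nw.toList])

def replace_multiple (text : String) (replacements : List (Int × Int × String)) : String :=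
  -- replacements = sorted(replacements, key=lambda x: x[0])
  match replaceAGo text.toList (PySem.List.sorted replacements (fun x => x.1)) 0 [] with
  | some chunks => String.ofList (PySem.Chars.join [] chunks)   -- "".join(chunks)
  | none => ""                                                  -- ValueError path (outside Pre_)

-- ===== PORT B =====
-- B's loop over reversed(sorted(...)); prevStart = none plays Python's None;
-- none result = the ValueError path
def altGo (t : List Char) (l : List (Int × Int × String))
    (out : List Char) (prevStart : Option Int) : Option (List Char × Option Int) :=
  match l with
  | [] => some (out, prevStart)
  | (s, e, nw) :: rest =>
      match prevStart with
      | none =>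
          altGo t rest (nw.toList ++ PySem.List.slice t (some e) none ++ out) (some s)
      | some p =>
          if p < e then none   -- raise ValueError("Overlapping replacements are not allowed.")
          else altGo t rest (nw.toList ++ PySem.List.slice t (some e) (some p) ++ out) (some s)

def replace_multiple_alt (text : String) (replacements : List (Int × Int × String)) : String :=
  match altGo text.toList ((PySem.List.sorted replacements (fun x => x.1)).reverse) [] none with
  | some (_, none) => text                                      -- no replacements
  | some (out, some p) => String.ofList (PySem.List.slice text.toList none (some p) ++ out)
  | none => ""                                                  -- ValueError path (outside Pre_)

-- ===== PRECONDITION & SPEC =====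
-- Pre_ is exactly the condition under which A returns normally: the stably-sorted
-- replacements start at a non-negative offset and are non-overlapping (each end offset at
-- most the next start).  Outside it A raises ValueError.
def Pre_replace_multiple (_text : String) (replacements : List (Int × Int × String)) : Prop :=
  (∀ r ∈ (PySem.List.sorted replacements (fun x => x.1)).head?, 0 ≤ r.1) ∧
  List.IsChain (fun a b => a.2.1 ≤ b.1) (PySem.List.sorted replacements (fun x => x.1))

instance (text : String) (replacements : List (Int × Int × String)) : Decidable (Pre_replace_multiple text replacements) := by unfold Pre_replace_multiple; infer_instance

def pvWitness_replace_multiple : String × (List (Int × Int × String)) :=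
  ("hello world", [(6, 11, "there"), (0, 5, "Hi")])

def Spec_replace_multiple (text : String) (replacements : List (Int × Int × String)) (out : String) : Prop := out = replace_multiple_alt text replacements
instance (text : String) (replacements : List (Int × Int × String)) (out : String) : Decidable (Spec_replace_multiple text replacements out) := by unfold Spec_replace_multiple; infer_instance

-- ===== CLAIM (what is proved, stated in full; the proofs are below) =====
def Claim_equal_replace_multiple : Prop := ∀ (text : String) (replacements : List (Int × Int × String)), Dom_replace_multiple text replacements → Pre_replace_multiple text replacements → Spec_replace_multiple text replacements (replace_multiple text replacements)

-- ===== LEMMAS AND PROOFS =====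

-- the slices strictly after the first start: text[e₁:s₂] ++ new₂ ++ … ++ text[eₖ:]
def midChunks (t : List Char) : Int → List (Int × Int × String) → List Char
  | prevEnd, [] => PySem.List.slice t (some prevEnd) none
  | prevEnd, (s, e, nw) :: rest =>
      PySem.List.slice t (some prevEnd) (some s) ++ nw.toList ++ midChunks t e rest

theorem flatten_intersperse_nil (parts : List (List Char)) :
    (List.intersperse ([] : List Char) parts).flatten = parts.flatten := by
  induction parts with
  | nil => rfl
  | cons a l ih =>
      cases l with
      | nil => rfl
      | cons b m => simpa using ih

theorem join_nil_eq_flatten (parts : List (List Char)) :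
    PySem.Chars.join [] parts = parts.flatten := by
  simpa [PySem.Chars.join, List.intercalate] using flatten_intersperse_nil parts

-- A's loop never raises on a non-overlapping sorted list and flattens to midChunks
theorem replaceAGo_eq (t : List Char) (l : List (Int × Int × String)) :
    ∀ (lo : Int) (chunks : List (List Char)),
    List.IsChain (fun a b => a.2.1 ≤ b.1) l →
    (∀ r ∈ l.head?, lo ≤ r.1) →
    ∃ cs, replaceAGo t l lo chunks = some cs ∧
      cs.flatten = chunks.flatten ++ midChunks t lo l := by
  induction l with
  | nil =>
      intro lo chunks _ _
      exact ⟨_, rfl, by simp [midChunks]⟩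
  | cons x rest ih =>
      obtain ⟨s, e, nw⟩ := x
      intro lo chunks hc hh
      have hs : lo ≤ s := hh _ rfl
      rw [List.isChain_cons] at hc
      obtain ⟨cs, hrun, hflat⟩ :=
        ih e (chunks ++ [PySem.List.slice t (some lo) (some s), nw.toList]) hc.2
          (fun r hr => by simpa using hc.1 r hr)
      refine ⟨cs, ?_, ?_⟩
      · simp only [replaceAGo, if_neg (not_lt.mpr hs)]
        exact hrun
      · rw [hflat]
        simp [midChunks]

-- altGo distributes over append (it threads its state left to right)
theorem altGo_append (t : List Char) (m₁ m₂ : List (Int × Int × String)) :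
    ∀ (out : List Char) (prev : Option Int),
    altGo t (m₁ ++ m₂) out prev =
      match altGo t m₁ out prev with
      | some (o, p) => altGo t m₂ o p
      | none => none := by
  induction m₁ with
  | nil => intro out prev; rfl
  | cons x rest ih =>
      obtain ⟨s, e, nw⟩ := x
      intro out prev
      cases prev with
      | none => simpa [altGo] using ih _ (some s)
      | some p =>
          by_cases hpe : p < e
      
          · simp [altGo, hpe]
          · simpa [altGo, hpe] using ih _ (some s)

-- over the reversed non-overlapping sorted list, B's loop produces the first start and
-- everything of A's output after it
theorem altGo_reverse_eq (t : List Char) :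
    ∀ (l : List (Int × Int × String)) (s e : Int) (nw : String) (out : List Char),
    List.IsChain (fun a b => a.2.1 ≤ b.1) ((s, e, nw) :: l) →
    altGo t (((s, e, nw) :: l).reverse) out none =
      some (nw.toList ++ midChunks t e l ++ out, some s) := by
  intro l
  induction l with
  | nil =>
      intro s e nw out _
      simp [altGo, midChunks]
  | cons y rest ih =>
      obtain ⟨s', e', nw'⟩ := y
      intro s e nw out hc
      rw [List.isChain_cons] at hc
      have hse : e ≤ s' := by simpa using hc.1 (s', e', nw') rfl
      have hstep := ih s' e' nw' out hc.2
      rw [show ((s, e, nw) :: (s', e', nw') :: rest).reverse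
            = ((s', e', nw') :: rest).reverse ++ [(s, e, nw)] by simp]
      rw [altGo_append, hstep]
      simp [altGo, not_lt.mpr hse, midChunks]

-- ===== VERDICT (by name: the statement is the Claim_ definition above) =====
theorem replace_multiple_spec : Claim_equal_replace_multiple := by
  intro text replacements _ hpre
  obtain ⟨hh, hc⟩ := hpre
  unfold Spec_replace_multiple replace_multiple replace_multiple_alt
  cases hsrt : PySem.List.sorted replacements (fun x => x.1) with
  | nil => simp [replaceAGo, altGo]
  | cons x rest =>
      obtain ⟨s, e, nw⟩ := x
      rw [hsrt] at hh hc
      have h0s : (0:Int) ≤ s := hh (s, e, nw) rfl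
      obtain ⟨cs, hrun, hflat⟩ := replaceAGo_eq text.toList ((s, e, nw) :: rest) 0 [] hc
        (fun r hr => by
          have hrx : (s, e, nw) = r := by simpa using hr
          rw [← hrx]
          exact h0s)
      rw [hrun, altGo_reverse_eq text.toList rest s e nw [] hc]
      show String.ofList (PySem.Chars.join [] cs)
          = String.ofList (PySem.List.slice text.toList none (some s)
              ++ (nw.toList ++ midChunks text.toList e rest ++ []))
      rw [join_nil_eq_flatten, hflat]
      simp [midChunks]
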